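-- pv_equiv track=rewrite | github.com/AlekseyProtopopov/Informatics | Chapter_5/7.py | plastic_balance
-- ===== SOURCE A (Python) =====
-- def plastic_balance(lst):
--     while len(lst) > 2:
--         left_sum = lst[0] + lst[-1]
--         middle_sum = sum(lst[1:-1])
--
--         if left_sum == middle_sum:
--             return lst[1:-1]
--
--         lst = lst[1:-1]
--
--     return []
-- ===== SOURCE B (Python) =====
-- def plastic_balance(lst):
--     n = len(lst)
--     w = sum(lst)  # running sum of the current window lst[k : n-k]
--     k = 0
--     while n - 2 * k > 2:
--         ends = lst[k] + lst[n - 1 - k]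
--         if 2 * ends == w:
--             return lst[k + 1 : n - 1 - k]
--         w -= ends
--         k += 1
--     return []
-- ===== Notes on version B (the rewrite author's own statement) =====
-- stated objective: faster
-- what changed: Instead of repeatedly slicing the list and re-summing the middle each iteration, B walks an index k inward over the original list keeping a running window sum, testing each symmetric window in O(1).
import Mathlib
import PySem

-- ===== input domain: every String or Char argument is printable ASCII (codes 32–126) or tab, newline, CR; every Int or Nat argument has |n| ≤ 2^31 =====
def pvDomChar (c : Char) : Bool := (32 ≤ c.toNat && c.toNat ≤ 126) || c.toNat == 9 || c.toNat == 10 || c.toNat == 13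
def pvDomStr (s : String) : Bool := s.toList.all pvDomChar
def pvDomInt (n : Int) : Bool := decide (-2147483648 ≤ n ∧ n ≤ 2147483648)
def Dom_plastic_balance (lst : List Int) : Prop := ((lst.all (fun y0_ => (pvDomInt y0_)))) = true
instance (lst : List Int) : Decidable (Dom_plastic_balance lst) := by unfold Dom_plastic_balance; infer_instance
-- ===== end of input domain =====

-- B replaces A's quadratic re-summing of each peeled slice by one O(n) pass over the
-- original list with a running window sum (objective: faster, asymptotic).

-- ===== PORT A =====
-- literal port of A: repeatedly slice lst[1:-1]; indices 0 and -1 are in range since length > 2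
def plastic_balance (lst : List Int) : List Int :=
  if _h : lst.length > 2 then
    let left_sum := PySem.List.pyGetD lst 0 0 + PySem.List.pyGetD lst (-1) 0
    let middle_sum := (PySem.List.slice lst (some 1) (some (-1))).sum
    if left_sum = middle_sum then PySem.List.slice lst (some 1) (some (-1))
    else plastic_balance (PySem.List.slice lst (some 1) (some (-1)))
  else []
termination_by lst.length
decreasing_by
  simp only [PySem.List.length_slice, PySem.List.clampIdx_neg_one]
  have : PySem.List.clampIdx lst.length 1 = min 1 lst.length := PySem.List.clampIdx_natCast _ 1
  omega

-- ===== PORT B =====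
-- loop of Source B: k walks inward, w is the running sum of the window lst[k : n-k]
def pbAux (lst : List Int) (n : Nat) (w : Int) (k : Nat) : List Int :=
  if n > 2 * k + 2 then
    let ends := PySem.List.pyGetD lst (k : Int) 0 + PySem.List.pyGetD lst ((n : Int) - 1 - k) 0
    if 2 * ends = w then PySem.List.slice lst (some ((k : Int) + 1)) (some ((n : Int) - 1 - k))
    else pbAux lst n (w - ends) (k + 1)
  else []
termination_by n - 2 * k

def plastic_balance_alt (lst : List Int) : List Int :=
  pbAux lst lst.length lst.sum 0

-- ===== PRECONDITION & SPEC =====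
def Spec_plastic_balance (lst : List Int) (out : List Int) : Prop := out = plastic_balance_alt lst
instance (lst : List Int) (out : List Int) : Decidable (Spec_plastic_balance lst out) := by unfold Spec_plastic_balance; infer_instance

-- ===== CLAIM (what is proved, stated in full; the proofs are below) =====
def Claim_equal_plastic_balance : Prop := ∀ (lst : List Int), Dom_plastic_balance lst → Spec_plastic_balance lst (plastic_balance lst)

-- ===== LEMMAS AND PROOFS =====

-- the window of the original list that A's current list equals after k peels
def pvWin (lst : List Int) (k : Nat) : List Int :=
  (lst.drop k).take (lst.length - 2 * k)

lemma pvWin_length (lst : List Int) (k : Nat) (h : 2 * k ≤ lst.length) :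
    (pvWin lst k).length = lst.length - 2 * k := by
  simp [pvWin]; omega

lemma pvWin_struct (lst : List Int) (k : Nat) (h : 2 * k + 2 < lst.length) :
    pvWin lst k = lst.getD k 0 :: (pvWin lst (k + 1) ++ [lst.getD (lst.length - 1 - k) 0]) := by
  unfold pvWin
  have hk : k < lst.length := by omega
  rw [List.drop_eq_getElem_cons hk]
  have h1 : lst.length - 2 * k = (lst.length - 2 * k - 2) + 1 + 1 := by omega
  rw [h1, List.take_succ_cons, List.take_add_one]
  have h2 : (lst.drop (k+1))[lst.length - 2 * k - 2]? = some (lst.getD (lst.length - 1 - k) 0) := by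
    rw [List.getElem?_drop]
    have h3 : k + 1 + (lst.length - 2 * k - 2) = lst.length - 1 - k := by omega
    rw [h3, List.getD_eq_getElem?_getD, List.getElem?_eq_getElem (by omega)]
    simp
  rw [h2]
  simp [List.getD_eq_getElem?_getD, List.getElem?_eq_getElem hk]
  omega

lemma pv_slice_mid (x y : Int) (xs : List Int) :
    PySem.List.slice ((x :: xs) ++ [y]) (some 1) (some (-1)) = xs := by
  simp [PySem.List.slice, PySem.List.clampIdx]
  rw [if_neg (by omega)]
  simp

lemma pv_main (m : Nat) (lst : List Int) (k : Nat)
    (hm : lst.length - 2 * k ≤ m) (h : 2 * k ≤ lst.length) :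
    plastic_balance (pvWin lst k) = pbAux lst lst.length (pvWin lst k).sum k := by
  induction m generalizing k with
  | zero =>
    rw [plastic_balance, pbAux,
      dif_neg (show ¬ ((pvWin lst k).length > 2) by rw [pvWin_length lst k h]; omega),
      if_neg (show ¬ (lst.length > 2 * k + 2) by omega)]
  | succ m ih =>
    by_cases hc : lst.length > 2 * k + 2
    · -- one more peel: decompose the window
      have hs := pvWin_struct lst k (by omega)
      set a := lst.getD k 0 with ha
      set b := lst.getD (lst.length - 1 - k) 0 with hb
      rw [plastic_balance, pbAux,
        dif_pos (show (pvWin lst k).length > 2 by rw [pvWin_length lst k h]; omega),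
        if_pos hc]
      -- left_sum = a + b, A's middle slice is the next window
      have hl0 : PySem.List.pyGetD (pvWin lst k) 0 0 = a := by
        rw [hs]; exact PySem.List.pyGetD_zero_cons _ _ _
      have hlm : PySem.List.pyGetD (pvWin lst k) (-1) 0 = b := by
        rw [hs, ← List.cons_append]
        exact PySem.List.pyGetD_neg_one_append_singleton _ _ _
      have hmid : PySem.List.slice (pvWin lst k) (some 1) (some (-1)) = pvWin lst (k + 1) := by
        rw [hs, ← List.cons_append, pv_slice_mid]
      -- B's ends are the same two elements
      have hek : PySem.List.pyGetD lst (k : Int) 0 = a := by simp [ha]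
      have heb : PySem.List.pyGetD lst ((lst.length : Int) - 1 - k) 0 = b := by
        have hcast : (lst.length : Int) - 1 - k = ((lst.length - 1 - k : Nat) : Int) := by
          omega
        rw [hcast, PySem.List.pyGetD_natCast, hb, List.getD_eq_getElem?_getD]
      -- B's slice is the next window
      have hbs : PySem.List.slice lst (some ((k : Int) + 1)) (some ((lst.length : Int) - 1 - k))
          = pvWin lst (k + 1) := by
        have hc1 : (k : Int) + 1 = ((k + 1 : Nat) : Int) := by omega
        have hc2 : (lst.length : Int) - 1 - k = ((lst.length - 1 - k : Nat) : Int) := by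
          omega
        rw [hc1, hc2, PySem.List.slice_natCast]
        unfold pvWin
        congr 1
        omega
      have hsum : (pvWin lst k).sum = a + ((pvWin lst (k + 1)).sum + b) := by
        rw [hs]; simp
      simp only [hl0, hlm, hmid, hek, heb, hbs, hsum]
      by_cases he : a + b = (pvWin lst (k + 1)).sum
      · rw [if_pos he, if_pos (show 2 * (a + b) = a + ((pvWin lst (k + 1)).sum + b) by omega)]
      · rw [if_neg he, if_neg (show ¬ (2 * (a + b) = a + ((pvWin lst (k + 1)).sum + b)) by omega)]
        have harg : a + ((pvWin lst (k + 1)).sum + b) - (a + b) = (pvWin lst (k + 1)).sum := by ring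
        rw [harg]
        exact ih (k + 1) (by omega) (by omega)
    · -- both loops exit with the same []
      rw [plastic_balance, pbAux,
        dif_neg (show ¬ ((pvWin lst k).length > 2) by rw [pvWin_length lst k h]; omega),
        if_neg hc]

theorem plastic_balance_spec : Claim_equal_plastic_balance := by
  intro lst _
  unfold Spec_plastic_balance plastic_balance_alt
  have h := pv_main lst.length lst 0 (by omega) (by omega)
  simp [pvWin] at h
  exact h
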